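-- pv_equiv track=rewrite | github.com/aveuiller/code-kata | hackerrank/src/dynamic_programming/abbreviation/abbreviation.py | is_capitalizable
-- ===== SOURCE A (Python) =====
-- def is_capitalizable(a, b):
--     """
--     # TODO: Still has timeouts
--     """
--     if not b:
--         if not a:
--             return True
--         elif a[0].islower():
--             return is_capitalizable(a[1:], b)
--         else:
--             return False
--     elif not a:
--         return False
--
--     first_a = a[0]
--     first_b = b[0] if b else ''
--
--     if first_a.islower():
--         if first_a.upper() == first_b:
--             return is_capitalizable(a[1:], b) or is_capitalizable(a[1:], b[1:])
--         else:
--             return is_capitalizable(a[1:], b)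
--     elif first_a == first_b:
--         return is_capitalizable(a[1:], b[1:])
--     else:
--         return False
-- ===== SOURCE B (Python) =====
-- def is_capitalizable(a, b):
--     # Bottom-up DP over suffixes: row[j] == "current suffix of a can be abbreviated to b[j:]".
--     n = len(b)
--     row = [False] * n + [True]
--     for c in reversed(a):
--         if c.islower():
--             cu = c.upper()
--             row = [((cu == bj and nxt) or cur)
--                    for bj, cur, nxt in zip(b, row, row[1:])] + [row[-1]]
--         else:
--             row = [(c == bj and nxt)
--                    for bj, cur, nxt in zip(b, row, row[1:])] + [False]
--     return row[0]
-- ===== Notes on version B (the rewrite author's own statement) =====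
-- stated objective: alternative
-- what changed: Replaced the exponential two-branch suffix recursion by a bottom-up dynamic program that keeps one Boolean row over positions of b and sweeps a once from the right; it trades A's worst-case exponential branching for a uniform O(|a|*|b|) cost.
import Mathlib
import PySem

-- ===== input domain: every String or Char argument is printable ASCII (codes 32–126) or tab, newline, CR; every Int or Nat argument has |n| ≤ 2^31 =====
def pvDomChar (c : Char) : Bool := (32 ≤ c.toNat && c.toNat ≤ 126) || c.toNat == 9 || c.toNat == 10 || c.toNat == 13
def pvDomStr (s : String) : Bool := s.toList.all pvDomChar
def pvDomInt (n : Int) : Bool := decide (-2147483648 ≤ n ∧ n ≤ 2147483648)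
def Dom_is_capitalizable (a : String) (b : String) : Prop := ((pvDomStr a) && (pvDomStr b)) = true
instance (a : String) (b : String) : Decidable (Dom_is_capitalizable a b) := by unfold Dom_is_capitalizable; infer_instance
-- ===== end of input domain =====

-- B replaces A's branching suffix recursion by a single right-to-left DP sweep keeping one Boolean row over positions of b (objective: alternative).

-- ===== PORT A =====
-- literal transliteration of A's recursion on the character lists of a and b
def goA : List Char → List Char → Bool
  | [], [] => true
  | c :: a, [] => if PySem.Chars.islower c then goA a [] else false
  | [], _ :: _ => false
  | c :: a, d :: b =>
      if PySem.Chars.islower c then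
        if PySem.Chars.upperChar c = d then goA a (d :: b) || goA a b
        else goA a (d :: b)
      else if c = d then goA a b
      else false
  termination_by a _ => a.length

def is_capitalizable (a : String) (b : String) : Bool :=
  goA a.toList b.toList

-- ===== PORT B =====
-- one DP step: given char c of a, the remaining part of b and the matching tail of the
-- current row (row.length = bs.length + 1), produce the new row (Source B's zip comprehension)
def stepB (c : Char) : List Char → List Bool → List Bool
  | [], row => if PySem.Chars.islower c then row else [false]
  | _ :: _, [] => []
  | bj :: bs, cur :: rest =>
      (if PySem.Chars.islower c then (PySem.Chars.upperChar c == bj && rest.headD false) || cur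
       else (c == bj && rest.headD false)) :: stepB c bs rest

def is_capitalizable_alt (a : String) (b : String) : Bool :=
  let init := List.replicate b.toList.length false ++ [true]
  (a.toList.reverse.foldl (fun row c => stepB c b.toList row) init).headD false

-- ===== PRECONDITION & SPEC =====
def Spec_is_capitalizable (a : String) (b : String) (out : Bool) : Prop := out = is_capitalizable_alt a b
instance (a : String) (b : String) (out : Bool) : Decidable (Spec_is_capitalizable a b out) := by unfold Spec_is_capitalizable; infer_instance

-- ===== CLAIM (what is proved, stated in full; the proofs are below) =====
def Claim_equal_is_capitalizable : Prop := ∀ (a : String) (b : String), Dom_is_capitalizable a b → Spec_is_capitalizable a b (is_capitalizable a b)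

-- ===== LEMMAS AND PROOFS =====

-- the intended value of the DP row for a given suffix pair: row j = goA as (bs.drop j)
def rowOf (as : List Char) : List Char → List Bool
  | [] => [goA as []]
  | bj :: bs => goA as (bj :: bs) :: rowOf as bs

theorem rowOf_init (bs : List Char) : rowOf [] bs = List.replicate bs.length false ++ [true] := by
  induction bs with
  | nil => simp [rowOf, goA]
  | cons bj bs ih => simp [rowOf, goA, ih, List.replicate_succ]

theorem stepB_rowOf (c : Char) (as : List Char) (bs : List Char) :
    stepB c bs (rowOf as bs) = rowOf (c :: as) bs := by
  induction bs with
  | nil =>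
      simp only [rowOf, stepB, goA]
      split <;> simp
  | cons bj bs ih =>
      have hnxt : (rowOf as bs).headD false = goA as bs := by
        cases bs <;> simp [rowOf]
      show stepB c (bj :: bs) (goA as (bj :: bs) :: rowOf as bs)
          = goA (c :: as) (bj :: bs) :: rowOf (c :: as) bs
      rw [stepB, hnxt, ih]
      congr 1
      by_cases hl : PySem.Chars.islower c
      · by_cases he : PySem.Chars.upperChar c = bj
        · simp [goA, hl, he, Bool.or_comm]
        · have hne : (PySem.Chars.upperChar c == bj) = false := by simpa using he
          simp [goA, hl, he, hne]
      · by_cases he : c = bj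
        · subst he; simp [goA, hl]
        · simp [goA, hl, he]

theorem foldl_stepB (bs : List Char) (rs as : List Char) :
    rs.foldl (fun row c => stepB c bs row) (rowOf as bs) = rowOf (rs.reverse ++ as) bs := by
  induction rs generalizing as with
  | nil => simp
  | cons c rs ih => simp [List.foldl_cons, stepB_rowOf, ih]

theorem headD_rowOf (as bs : List Char) : (rowOf as bs).headD false = goA as bs := by
  cases bs <;> simp [rowOf]

-- ===== VERDICT (by name: the statement is the Claim_ definition above) =====
theorem is_capitalizable_spec : Claim_equal_is_capitalizable := by
  intro a b _
  unfold Spec_is_capitalizable is_capitalizable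
  show goA a.toList b.toList
      = ((a.toList.reverse.foldl (fun row c => stepB c b.toList row)
          (List.replicate b.toList.length false ++ [true])).headD false)
  rw [← rowOf_init]
  have h := foldl_stepB b.toList a.toList.reverse []
  simp only [List.append_nil] at h
  rw [h, List.reverse_reverse, headD_rowOf]
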